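-- pv_equiv track=rewrite | github.com/mayaborkar/Advent | 2015/advent20a.py | find_lowest_house
-- ===== SOURCE A (Python) =====
-- def find_lowest_house(target):
--     limit = target
--     presents = [0] * (limit // 10 + 1)
--
--     for elf in range(1, limit // 10 + 1):
--         for house in range(elf, limit // 10 + 1, elf):
--             presents[house] += elf * 10
--
-- #keeps track of the number of iterations
--     for house_number, total_presents in enumerate(presents):
--         if total_presents >= limit:
--             return house_number
--
--     return None
-- ===== SOURCE B (Python) =====
-- def find_lowest_house(target):
--     # No presents array: walk houses upward, computing each house's divisor
--     # sum directly by trial division up to sqrt(house).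
--     for house in range(target // 10 + 1):
--         if house == 0:
--             total = 0
--         else:
--             s = 0
--             d = 1
--             while d * d <= house:
--                 if house % d == 0:
--                     s += d
--                     q = house // d
--                     if d != q:
--                         s += q
--                 d += 1
--             total = s * 10
--         if total >= target:
--             return house
--     return None
-- ===== Notes on version B (the rewrite author's own statement) =====
-- stated objective: alternative
-- what changed: Replaces the elf-sieve that fills a presents array (one slot per candidate house, then a scan) with a direct walk over the candidate houses that computes each house's divisor sum on the fly by trial division up to sqrt(house), returning at the first qualifying house and never allocating an array.
import Mathlib
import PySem

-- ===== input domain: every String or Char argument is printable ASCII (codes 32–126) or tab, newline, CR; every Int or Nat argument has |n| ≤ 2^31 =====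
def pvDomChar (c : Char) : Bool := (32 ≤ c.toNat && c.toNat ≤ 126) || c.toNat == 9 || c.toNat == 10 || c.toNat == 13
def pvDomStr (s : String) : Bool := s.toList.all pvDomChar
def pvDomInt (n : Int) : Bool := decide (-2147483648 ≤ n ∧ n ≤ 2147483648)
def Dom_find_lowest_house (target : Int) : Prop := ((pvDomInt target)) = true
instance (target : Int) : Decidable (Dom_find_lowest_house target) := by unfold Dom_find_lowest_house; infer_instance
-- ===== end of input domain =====

-- B replaces A's elf-sieve into a presents array by a direct per-house divisor
-- sum via trial division up to sqrt(house) (objective: alternative algorithm,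
-- no array; not claimed faster).

-- ===== PORT A =====
-- inner loop: 'for house in range(elf, limit//10+1, elf): presents[house] += elf*10'
def pvSieveStep (n1 : Int) (pres : List Int) (elf : Int) : List Int :=
  (PySem.List.pyRange elf n1 elf).foldl
    (fun p house => p.set house.toNat (PySem.List.pyGetD p house 0 + elf * 10)) pres

-- final loop: 'for house_number, total_presents in enumerate(presents): if total_presents >= limit: return house_number'
def pvScanA (limit : Int) : List (Int × Int) → Option Int
  | [] => none
  | (i, t) :: rest => if limit ≤ t then some i else pvScanA limit rest

def find_lowest_house (target : Int) : Option Int :=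
  let limit := target
  let n1 := PySem.Int.floordiv limit 10 + 1
  let presents : List Int := List.replicate n1.toNat 0
  let presents := (PySem.List.pyRange 1 n1 1).foldl (pvSieveStep n1) presents
  pvScanA limit (PySem.List.enumerate presents)

-- ===== PORT B =====
-- 'while d*d <= house: if house % d == 0: s += d; q = house//d; if d != q: s += q; d += 1'
def pvTrial (house : Int) (d : Int) (s : Int) : Int :=
  if d * d ≤ house then
    pvTrial house (d + 1)
      (if PySem.Int.mod house d = 0 then
        s + d +
          (if d ≠ PySem.Int.floordiv house d then PySem.Int.floordiv house d else 0)
      else s)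
  else s
termination_by (house + 1 - d).toNat
decreasing_by
  rename_i hdd
  have hd : d ≤ d * d := by
    rcases Int.le_total d 0 with h | h
    · exact le_trans h (mul_self_nonneg d)
    · nlinarith
  omega

def pvTotalB (house : Int) : Int :=
  if house = 0 then 0 else pvTrial house 1 0 * 10

def pvScanB (target : Int) : List Int → Option Int
  | [] => none
  | h :: rest => if target ≤ pvTotalB h then some h else pvScanB target rest

def find_lowest_house_alt (target : Int) : Option Int :=
  pvScanB target (PySem.List.pyRange 0 (PySem.Int.floordiv target 10 + 1) 1)

-- ===== PRECONDITION & SPEC =====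
def Spec_find_lowest_house (target : Int) (out : Option Int) : Prop := out = find_lowest_house_alt target
instance (target : Int) (out : Option Int) : Decidable (Spec_find_lowest_house target out) := by unfold Spec_find_lowest_house; infer_instance

-- ===== CLAIM =====
def Claim_equal_find_lowest_house : Prop := ∀ (target : Int), Dom_find_lowest_house target → Spec_find_lowest_house target (find_lowest_house target)

-- ===== LEMMAS AND PROOFS =====

-- common spec: sum of the positive divisors of h (0 for h = 0)
def pvDsum (h : Nat) : Int :=
  ∑ e ∈ (Finset.range (h + 1)).filter (fun e => e ≠ 0 ∧ h % e = 0), (e : Int)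

-- divisors of h not yet collected when B's trial loop stands at d
def pvRset (h d : Nat) : Finset Nat :=
  (Finset.range (h + 1)).filter (fun e => e ≠ 0 ∧ h % e = 0 ∧ d ≤ e ∧ d ≤ h / e)

lemma pvRset_empty (h d : Nat) (hgt : h < d * d) : pvRset h d = ∅ := by
  ext e
  simp only [pvRset, Finset.mem_filter, Finset.mem_range, Finset.notMem_empty, iff_false]
  rintro ⟨he, e0, hmod, hde, hdq⟩
  have hdvd : e ∣ h := Nat.dvd_of_mod_eq_zero hmod
  have hmul : e * (h / e) = h := Nat.mul_div_cancel' hdvd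
  have : d * d ≤ e * (h / e) := Nat.mul_le_mul hde hdq
  omega

lemma pvRset_step (h d : Nat) (hh : 1 ≤ h) (hd : 1 ≤ d) (hdd : d * d ≤ h) :
    (∑ e ∈ pvRset h d, (e : Int))
      = (if h % d = 0 then
          ((d : Int) + (if d ≠ h / d then ((h / d : Nat) : Int) else 0))
         else 0)
        + ∑ e ∈ pvRset h (d + 1), (e : Int) := by
  by_cases hmod : h % d = 0
  · have hdvd : d ∣ h := Nat.dvd_of_mod_eq_zero hmod
    have hqmul : d * (h / d) = h := Nat.mul_div_cancel' hdvd
    have hdq : d ≤ h / d := (Nat.le_div_iff_mul_le (by omega)).2 hdd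
    have hq1 : 1 ≤ h / d := by omega
    have hqdvd : (h / d) ∣ h := Nat.div_dvd_of_dvd hdvd
    have hqle : h / d ≤ h := Nat.le_of_dvd (by omega) hqdvd
    have hqmod : h % (h / d) = 0 := Nat.mod_eq_zero_of_dvd hqdvd
    have hqq : h / (h / d) = d := Nat.div_div_self hdvd (by omega)
    have hset : pvRset h d = insert d (insert (h / d) (pvRset h (d + 1))) := by
      ext e
      simp only [pvRset, Finset.mem_filter, Finset.mem_range, Finset.mem_insert]
      constructor
      · rintro ⟨he, e0, hm, hde, hdqe⟩
        by_cases h1 : e = d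
        · exact Or.inl h1
        by_cases h2 : h / e = d
        · refine Or.inr (Or.inl ?_)
          have hdvde : e ∣ h := Nat.dvd_of_mod_eq_zero hm
          have : h / (h / e) = e := Nat.div_div_self hdvde (by omega)
          rw [← h2, this]
        · exact Or.inr (Or.inr ⟨he, e0, hm, by omega, by omega⟩)
      · rintro (rfl | rfl | ⟨he, e0, hm, hde, hdqe⟩)
        · exact ⟨by omega, by omega, hmod, le_rfl, hdq⟩
        · exact ⟨by omega, by omega, hqmod, hdq, by omega⟩
        · exact ⟨he, e0, hm, by omega, by omega⟩
    rw [hset, if_pos hmod]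
    have hdnot : d ∉ pvRset h (d + 1) := by
      simp only [pvRset, Finset.mem_filter, Finset.mem_range]
      rintro ⟨_, _, _, hle, _⟩; omega
    by_cases hq : d = h / d
    · rw [← hq, Finset.insert_idem, Finset.sum_insert hdnot, if_neg (fun hc => hc rfl)]
      ring
    · have hqnot : h / d ∉ pvRset h (d + 1) := by
        simp only [pvRset, Finset.mem_filter, Finset.mem_range]
        rintro ⟨_, _, _, _, hle⟩
        rw [hqq] at hle; omega
      have hdnot2 : d ∉ insert (h / d) (pvRset h (d + 1)) := by
        simp only [Finset.mem_insert]
        rintro (h1 | h1)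
        · exact hq h1
        · exact hdnot h1
      rw [Finset.sum_insert hdnot2, Finset.sum_insert hqnot, if_pos hq]
      ring
  · have hset : pvRset h d = pvRset h (d + 1) := by
      ext e
      simp only [pvRset, Finset.mem_filter, Finset.mem_range]
      constructor
      · rintro ⟨he, e0, hm, hde, hdqe⟩
        have hdvde : e ∣ h := Nat.dvd_of_mod_eq_zero hm
        have hmul : e * (h / e) = h := Nat.mul_div_cancel' hdvde
        have hne : e ≠ d := by rintro rfl; exact hmod hm
        have hne2 : h / e ≠ d := by
          rintro hEq
          apply hmod
          apply Nat.mod_eq_zero_of_dvd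
          rw [← hEq]
          exact Nat.div_dvd_of_dvd hdvde
        exact ⟨he, e0, hm, by omega, by omega⟩
      · rintro ⟨he, e0, hm, hde, hdqe⟩
        exact ⟨he, e0, hm, by omega, by omega⟩
    rw [hset]; simp [hmod]

lemma pvTrial_inv (m : Nat) : ∀ (h d : Nat) (s : Int), 1 ≤ h → 1 ≤ d → h + 1 - d ≤ m →
    pvTrial (h : Int) (d : Int) s = s + ∑ e ∈ pvRset h d, (e : Int) := by
  induction m with
  | zero =>
    intro h d s hh hd hm
    have hgt : h < d * d := by
      have : h + 1 ≤ d := by omega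
      have : d ≤ d * d := Nat.le_mul_of_pos_left d (by omega)
      omega
    rw [pvTrial.eq_def, if_neg (by exact_mod_cast Nat.not_le.2 hgt), pvRset_empty h d hgt]
    simp
  | succ m ih =>
    intro h d s hh hd hm
    rw [pvTrial.eq_def]
    by_cases hdd : d * d ≤ h
    · rw [if_pos (by exact_mod_cast hdd)]
      have hdh : d ≤ h := by
        have : d ≤ d * d := Nat.le_mul_of_pos_left d (by omega)
        omega
      have hcast1 : ((d : Int) + 1) = ((d + 1 : Nat) : Int) := by push_cast; ring
      have hmodc : PySem.Int.mod (h : Int) (d : Int) = ((h % d : Nat) : Int) :=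
        PySem.Int.mod_natCast h d
      have hdivc : PySem.Int.floordiv (h : Int) (d : Int) = ((h / d : Nat) : Int) :=
        PySem.Int.floordiv_natCast h d
      rw [hcast1, ih h (d + 1) _ hh (by omega) (by omega), pvRset_step h d hh hd hdd]
      rw [hmodc, hdivc]
      by_cases hmod : h % d = 0
      · rw [if_pos (by exact_mod_cast hmod), if_pos hmod]
        by_cases hq : d = h / d
        · have c1 : ¬ ((d : Int) ≠ ((h / d : Nat) : Int)) := by
            rw [ne_eq, Nat.cast_inj]; exact not_not_intro hq
          rw [if_neg c1, if_neg (not_not_intro hq)]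
          ring
        · have c1 : (d : Int) ≠ ((h / d : Nat) : Int) := by
            rw [ne_eq, Nat.cast_inj]; exact hq
          rw [if_pos c1, if_pos hq]
          ring
      · rw [if_neg (by exact_mod_cast hmod), if_neg hmod]
        ring
    · rw [if_neg (by exact_mod_cast hdd), pvRset_empty h d (by omega)]
      simp

lemma pvRset_one (h : Nat) (_hh : 1 ≤ h) :
    pvRset h 1 = (Finset.range (h + 1)).filter (fun e => e ≠ 0 ∧ h % e = 0) := by
  ext e
  simp only [pvRset, Finset.mem_filter, Finset.mem_range]
  constructor
  · rintro ⟨he, e0, hmod, _, _⟩; exact ⟨he, e0, hmod⟩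
  · rintro ⟨he, e0, hmod⟩
    refine ⟨he, e0, hmod, by omega, ?_⟩
    have : 1 ≤ h / e := (Nat.one_le_div_iff (by omega)).2 (by omega)
    omega

lemma pvTotalB_eq (h : Nat) : pvTotalB (h : Int) = 10 * pvDsum h := by
  by_cases h0 : h = 0
  · subst h0
    have h0 : pvDsum 0 = 0 := by decide
    simp [pvTotalB, h0]
  · have hh : 1 ≤ h := by omega
    rw [pvTotalB, if_neg (by exact_mod_cast h0)]
    rw [show ((1 : Int)) = ((1 : Nat) : Int) by norm_num] at *
    rw [pvTrial_inv (h + 1 - 1) h 1 0 hh le_rfl le_rfl, pvRset_one h hh]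
    rw [pvDsum]
    ring

lemma pvInner_len (L : List Int) (f : List Int → Int → Int) (pres : List Int) :
    (L.foldl (fun p house => p.set house.toNat (f p house)) pres).length = pres.length := by
  induction L generalizing pres with
  | nil => rfl
  | cons x L ih => simp [List.foldl_cons, ih]

lemma pvSieve_len (n1 : Int) (E : List Int) (pres : List Int) :
    (E.foldl (pvSieveStep n1) pres).length = pres.length := by
  induction E generalizing pres with
  | nil => rfl
  | cons e E ih =>
    rw [List.foldl_cons, ih]
    exact pvInner_len _ _ _

lemma pvInner_getD (c : Int) (L : List Int) (hL : ∀ x ∈ L, 0 ≤ x)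
    (pres : List Int) (h : Nat) (hh : h < pres.length) :
    (L.foldl (fun p house => p.set house.toNat (PySem.List.pyGetD p house 0 + c)) pres).getD h 0
      = pres.getD h 0 + c * (L.count (h : Int)) := by
  induction L generalizing pres with
  | nil => simp
  | cons x L ih =>
    have hx : 0 ≤ x := hL x (by simp)
    rw [List.foldl_cons, ih (fun y hy => hL y (by simp [hy])) _ (by simpa using hh),
      List.count_cons]
    by_cases hxh : x = (h : Int)
    · rw [hxh, PySem.List.pyGetD_natCast, Int.toNat_natCast]
      have hset : (pres.set h (pres.getD h 0 + c)).getD h 0 = pres.getD h 0 + c := by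
        rw [List.getD_eq_getElem _ _ (by simpa using hh)]
        exact List.getElem_set_self _
      rw [hset]
      simp only [beq_self_eq_true, if_true]
      push_cast
      ring
    · have hne : x.toNat ≠ h := by omega
      have hset : (pres.set x.toNat (PySem.List.pyGetD pres x 0 + c)).getD h 0
          = pres.getD h 0 := by
        rw [List.getD_eq_getElem _ _ (by simpa using hh), List.getD_eq_getElem _ _ hh]
        exact List.getElem_set_ne hne _
      rw [hset]
      rw [show (x == ((h : Int))) = false by simp [hxh]]
      simp

lemma pvCount_range (elf n1 : Int) (helf : 1 ≤ elf) (h : Nat) (hlt : (h : Int) < n1) :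
    ((PySem.List.pyRange elf n1 elf).count (h : Int))
      = if elf ∣ (h : Int) ∧ elf ≤ (h : Int) then 1 else 0 := by
  have hpos : (0 : Int) < elf := by omega
  have hnodup : (PySem.List.pyRange elf n1 elf).Nodup := by
    rw [PySem.List.pyRange_of_pos _ _ hpos]
    apply List.Nodup.map _ (List.nodup_range)
    intro a b hab
    have : elf * (a : Int) = elf * (b : Int) := by linarith
    have := mul_left_cancel₀ (by omega : elf ≠ 0) this
    exact_mod_cast this
  have hmem : (h : Int) ∈ PySem.List.pyRange elf n1 elf ↔ (elf ∣ (h : Int) ∧ elf ≤ (h : Int)) := by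
    rw [PySem.List.mem_pyRange_iff_of_pos hpos]
    constructor
    · rintro ⟨h1, h2, h3⟩
      refine ⟨?_, h1⟩
      have := dvd_add h3 (dvd_refl elf)
      simpa using this
    · rintro ⟨h1, h2⟩
      exact ⟨h2, hlt, dvd_sub h1 (dvd_refl elf)⟩
  by_cases hc : elf ∣ (h : Int) ∧ elf ≤ (h : Int)
  · rw [if_pos hc]
    exact List.count_eq_one_of_mem hnodup (hmem.2 hc)
  · rw [if_neg hc]
    exact List.count_eq_zero_of_not_mem (fun hm => hc (hmem.1 hm))

lemma pvOuter_getD (n1 : Int) (E : List Int) (hE : ∀ e ∈ E, 1 ≤ e)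
    (pres : List Int) (h : Nat) (hh : h < pres.length) (hlt : (h : Int) < n1) :
    (E.foldl (pvSieveStep n1) pres).getD h 0
      = pres.getD h 0
        + (E.map (fun e => if e ∣ (h : Int) ∧ e ≤ (h : Int) then e * 10 else 0)).sum := by
  induction E generalizing pres with
  | nil => simp
  | cons e E ih =>
    have he : 1 ≤ e := hE e (by simp)
    rw [List.foldl_cons,
      ih (fun y hy => hE y (by simp [hy])) _ (by rw [pvSieveStep, pvInner_len]; exact hh)]
    have hstep : (pvSieveStep n1 pres e).getD h 0
        = pres.getD h 0 + (if e ∣ (h : Int) ∧ e ≤ (h : Int) then e * 10 else 0) := by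
      rw [pvSieveStep,
        pvInner_getD (e * 10) _
          (fun x hx => by
            have := (PySem.List.mem_pyRange_iff_of_pos (by omega : (0:Int) < e) x).1 hx
            omega)
          pres h hh,
        pvCount_range e n1 he h hlt]
      split_ifs
      · ring
      · ring
    rw [hstep, List.map_cons, List.sum_cons]
    ring

lemma pvSum_list_range (f : Nat → Int) (n : Nat) :
    ((List.range n).map f).sum = ∑ i ∈ Finset.range n, f i := by
  induction n with
  | zero => simp
  | succ n ih => simp [List.range_succ, Finset.sum_range_succ, ih]

lemma pvDsum_shift (h : Nat) :
    10 * pvDsum h = ∑ k ∈ Finset.range h, (if (k + 1) ∣ h then (((k + 1 : Nat)) : Int) * 10 else 0) := by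
  rw [pvDsum, Finset.sum_filter, Finset.mul_sum, Finset.sum_range_succ']
  rw [show (10 : Int) * (if (0 : Nat) ≠ 0 ∧ h % 0 = 0 then ((0 : Nat) : Int) else 0) = 0 by simp,
    add_zero]
  apply Finset.sum_congr rfl
  intro k _
  by_cases hc : (k + 1) ∣ h
  · rw [if_pos (⟨by omega, Nat.mod_eq_zero_of_dvd hc⟩ : (k + 1 ≠ 0 ∧ h % (k + 1) = 0)), if_pos hc]
    push_cast; ring
  · rw [if_neg (fun hand => hc (Nat.dvd_of_mod_eq_zero hand.2)), if_neg hc]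
    ring

lemma pvPresents_getD (target : Int) (h : Nat) (hlt : (h : Int) < PySem.Int.floordiv target 10 + 1) :
    ((PySem.List.pyRange 1 (PySem.Int.floordiv target 10 + 1) 1).foldl
        (pvSieveStep (PySem.Int.floordiv target 10 + 1))
        (List.replicate (PySem.Int.floordiv target 10 + 1).toNat 0)).getD h 0
      = 10 * pvDsum h := by
  set n1 := PySem.Int.floordiv target 10 + 1 with hn1
  have hh : h < (List.replicate n1.toNat (0 : Int)).length := by
    rw [List.length_replicate]; omega
  rw [pvOuter_getD n1 _ (fun e he => ((PySem.List.mem_pyRange_one).1 he).1)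
      _ h hh hlt]
  have hrep : (List.replicate n1.toNat (0 : Int)).getD h 0 = 0 := by
    rw [List.getD_eq_getElem _ _ hh]
    exact List.getElem_replicate _
  rw [hrep, zero_add]
  -- turn the list sum over pyRange 1 n1 1 into a Finset.range sum
  rw [PySem.List.pyRange_one, List.map_map, pvSum_list_range]
  set m := (n1 - 1).toNat with hm
  have hhm : h ≤ m := by omega
  have hsub : Finset.range h ⊆ Finset.range m := by
    intro x hx
    rw [Finset.mem_range] at *
    omega
  have hzero : ∀ k ∈ Finset.range m, k ∉ Finset.range h →
      ((fun e => if e ∣ (h : Int) ∧ e ≤ (h : Int) then e * 10 else 0) ∘ fun k : Nat => 1 + (k : Int)) k = 0 := by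
    intro k _ hkh
    rw [Finset.mem_range] at hkh
    simp only [Function.comp_apply]
    rw [if_neg]
    rintro ⟨-, hle⟩
    omega
  rw [← Finset.sum_subset hsub hzero, pvDsum_shift]
  apply Finset.sum_congr rfl
  intro k hk
  have hk' : k < h := Finset.mem_range.1 hk
  simp only [Function.comp_apply]
  rw [show ((1 : Int) + (k : Int)) = (((k + 1 : Nat)) : Int) by push_cast; ring]
  by_cases hc : (k + 1) ∣ h
  · rw [if_pos ⟨Int.natCast_dvd_natCast.2 hc, Nat.cast_le.2 (by omega)⟩, if_pos hc]
  · rw [if_neg (fun hand => hc (Int.natCast_dvd_natCast.1 hand.1)), if_neg hc]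

lemma pvScan_eq (target : Int) (pres : List Int) : ∀ (s : Int), 0 ≤ s →
    (∀ k : Nat, k < pres.length → pres.getD k 0 = pvTotalB (s + k)) →
    pvScanA target (PySem.List.enumerate pres s)
      = pvScanB target (PySem.List.pyRange s (s + pres.length) 1) := by
  induction pres with
  | nil =>
    intro s hs hpt
    rw [PySem.List.enumerate_nil]
    simp only [List.length_nil, Nat.cast_zero, add_zero]
    rw [PySem.List.pyRange_one_eq_nil le_rfl]
    simp [pvScanA, pvScanB]
  | cons x xs ih =>
    intro s hs hpt
    rw [PySem.List.enumerate_cons]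
    have hcons : PySem.List.pyRange s (s + (x :: xs).length) 1
        = s :: PySem.List.pyRange (s + 1) ((s + 1) + (xs.length : Int)) 1 := by
      have h1 : s + ((x :: xs).length : Int) = (s + 1) + (xs.length : Int) := by
        simp only [List.length_cons]; push_cast; ring
      rw [h1]
      exact PySem.List.pyRange_one_cons (by omega)
    rw [hcons]
    have hx : x = pvTotalB s := by
      have := hpt 0 (by simp)
      simpa using this
    have hrec := ih (s + 1) (by omega) (fun k hk => by
      have := hpt (k + 1) (by simpa using Nat.succ_lt_succ hk)
      simpa [add_assoc, add_comm, add_left_comm] using this)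
    simp only [pvScanA, pvScanB]
    rw [hx, hrec]

-- ===== VERDICT =====
theorem find_lowest_house_spec : Claim_equal_find_lowest_house := by
  intro target _
  unfold Spec_find_lowest_house
  show pvScanA target
      (PySem.List.enumerate
        ((PySem.List.pyRange 1 (PySem.Int.floordiv target 10 + 1) 1).foldl
          (pvSieveStep (PySem.Int.floordiv target 10 + 1))
          (List.replicate (PySem.Int.floordiv target 10 + 1).toNat 0)))
    = pvScanB target (PySem.List.pyRange 0 (PySem.Int.floordiv target 10 + 1) 1)
  set n1 := PySem.Int.floordiv target 10 + 1 with hn1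
  by_cases hn : n1 ≤ 0
  · rw [PySem.List.pyRange_one_eq_nil (by omega : n1 ≤ 1), List.foldl_nil,
      show n1.toNat = 0 by omega, List.replicate_zero, PySem.List.enumerate_nil,
      PySem.List.pyRange_one_eq_nil (by omega : n1 ≤ 0)]
    simp [pvScanA, pvScanB]
  · set pres := (PySem.List.pyRange 1 n1 1).foldl (pvSieveStep n1)
      (List.replicate n1.toNat 0) with hpres
    have hlen : pres.length = n1.toNat := by
      rw [hpres, pvSieve_len, List.length_replicate]
    have hpt : ∀ k : Nat, k < pres.length → pres.getD k 0 = pvTotalB ((0 : Int) + k) := by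
      intro k hk
      rw [zero_add, pvTotalB_eq k, hpres, pvPresents_getD target k (by rw [← hn1]; omega)]
    have := pvScan_eq target pres 0 le_rfl hpt
    rw [this, show (0 : Int) + (pres.length : Int) = n1 by rw [hlen]; omega]
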